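-- pv_equiv track=rewrite | github.com/tmxkqotnl/studying_algorithm_funda | advanced_solving_problem/week5/after/table_search_2_.py | rowTop
-- ===== SOURCE A (Python) =====
-- def rowTop(n,seive):
--     row = []
--     for i in range(1,len(seive)):
--         sumOf = sum(seive[:i])
--         row.append(sumOf)
--         if sumOf>n:
--             break
--
--     return row
-- ===== SOURCE B (Python) =====
-- def rowTop(n, seive):
--     # stage 1: precompute all prefix sums of seive[:len(seive)-1] with a running total
--     prefix = []
--     total = 0
--     for x in seive[:len(seive)-1]:
--         total += x
--         prefix.append(total)
--     # stage 2: keep prefix sums up to and including the first one exceeding n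
--     row = []
--     for s in prefix:
--         row.append(s)
--         if s > n:
--             break
--     return row
-- ===== Notes on version B (the rewrite author's own statement) =====
-- stated objective: faster
-- what changed: Replaces the single loop that re-sums the slice seive[:i] at every iteration with two stages: one running-total pass precomputing all prefix sums, then a cut at the first sum exceeding n.
import Mathlib
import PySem

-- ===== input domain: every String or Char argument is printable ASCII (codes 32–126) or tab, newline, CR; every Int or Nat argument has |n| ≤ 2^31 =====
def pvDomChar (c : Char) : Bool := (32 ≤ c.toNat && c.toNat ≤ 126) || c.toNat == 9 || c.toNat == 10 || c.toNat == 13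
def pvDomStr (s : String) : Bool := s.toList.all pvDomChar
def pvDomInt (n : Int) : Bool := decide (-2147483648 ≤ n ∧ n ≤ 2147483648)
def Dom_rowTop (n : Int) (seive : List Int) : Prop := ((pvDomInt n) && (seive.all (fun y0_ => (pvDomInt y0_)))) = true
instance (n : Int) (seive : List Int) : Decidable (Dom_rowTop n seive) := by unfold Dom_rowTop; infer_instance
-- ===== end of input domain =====

-- B replaces A's per-iteration re-summing of a growing prefix with two stages — a running-total pass building all prefix sums, then a cut at the first one exceeding n (objective: faster).


-- ===== PORT A =====
-- loop over the indices i of range(1, len(seive)); re-sums seive[:i] each iteration; break appends then stops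
def rowTopA_loop (n : Int) (seive : List Int) : List Int → List Int → List Int
  | [], row => row
  | i :: rest, row =>
    let sumOf := (PySem.List.slice seive none (some i)).sum
    if sumOf > n then row ++ [sumOf]
    else rowTopA_loop n seive rest (row ++ [sumOf])

def rowTop (n : Int) (seive : List Int) : List Int :=
  rowTopA_loop n seive (PySem.List.pyRange 1 (seive.length : Int) 1) []

-- ===== PORT B =====
-- stage 1: running-total pass building every prefix sum of seive[:len(seive)-1]
-- (exact: the upper bound len-1 is ≥ 0 except on [], where both slice and take give [])
def rowTopB_prefix : Int → List Int → List Int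
  | _, [] => []
  | total, x :: rest => (total + x) :: rowTopB_prefix (total + x) rest

-- stage 2: keep the prefix sums up to and including the first one exceeding n
def rowTopB_cut (n : Int) : List Int → List Int
  | [] => []
  | s :: rest => if s > n then [s] else s :: rowTopB_cut n rest

def rowTop_alt (n : Int) (seive : List Int) : List Int :=
  rowTopB_cut n (rowTopB_prefix 0 (seive.take (seive.length - 1)))

-- ===== PRECONDITION & SPEC =====
def Spec_rowTop (n : Int) (seive : List Int) (out : List Int) : Prop := out = rowTop_alt n seive
instance (n : Int) (seive : List Int) (out : List Int) : Decidable (Spec_rowTop n seive out) := by unfold Spec_rowTop; infer_instance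

-- ===== CLAIM (what is proved, stated in full; the proofs are below) =====
def Claim_equal_rowTop : Prop := ∀ (n : Int) (seive : List Int), Dom_rowTop n seive → Spec_rowTop n seive (rowTop n seive)

-- ===== LEMMAS AND PROOFS =====

-- proof-internal intermediate: A's loop carried with a running sum instead of re-slicing
def pvRun (n : Int) : List Int → Int → List Int → List Int
  | [], _, row => row
  | x :: rest, acc, row =>
    let acc' := acc + x
    if acc' > n then row ++ [acc']
    else pvRun n rest acc' (row ++ [acc'])

lemma sum_take_succ (seive : List Int) (j : Nat) (hj : j < seive.length) :
    (seive.take (j+1)).sum = (seive.take j).sum + seive[j] :=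
  List.sum_take_succ seive j hj

lemma loop_eq (n : Int) (seive : List Int) :
    ∀ (k j : Nat) (row : List Int), seive.length - 1 ≤ j + k →
    rowTopA_loop n seive (PySem.List.pyRange ((j : Int) + 1) (seive.length : Int) 1) row
      = pvRun n (seive.dropLast.drop j) ((seive.take j).sum) row := by
  intro k
  induction k with
  | zero =>
    intro j row h
    have hm : (seive.length : Int) ≤ (j : Int) + 1 := by omega
    rw [PySem.List.pyRange_one_eq_nil hm]
    have : seive.dropLast.drop j = [] := by
      apply List.drop_eq_nil_of_le
      simpa [List.length_dropLast] using h
    rw [this]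
    rfl
  | succ k ih =>
    intro j row h
    by_cases hlt : j < seive.length - 1
    · have hj : j < seive.length := by omega
      have hcons : PySem.List.pyRange ((j : Int) + 1) (seive.length : Int) 1
          = ((j : Int) + 1) :: PySem.List.pyRange ((j : Int) + 1 + 1) (seive.length : Int) 1 :=
        PySem.List.pyRange_one_cons (by omega)
      have hdrop : seive.dropLast.drop j = seive[j] :: seive.dropLast.drop (j + 1) := by
        have hj' : j < seive.dropLast.length := by
          simpa [List.length_dropLast] using hlt
        rw [List.drop_eq_getElem_cons hj']
        congr 1
        simp [List.getElem_dropLast]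
      have hslice : (PySem.List.slice seive none (some ((j : Int) + 1))).sum
          = (seive.take j).sum + seive[j] := by
        have : ((j : Int) + 1) = ((j + 1 : Nat) : Int) := by push_cast; ring
        rw [this, PySem.List.slice_to_natCast, sum_take_succ seive j hj]
      rw [hcons, hdrop]
      simp only [rowTopA_loop, pvRun, hslice]
      split_ifs with hbreak
      · rfl
      · have : ((j : Int) + 1 + 1) = (((j + 1 : Nat) : Int) + 1) := by push_cast; ring
        rw [this, ih (j + 1) _ (by omega), sum_take_succ seive j hj]
    · have hm : (seive.length : Int) ≤ (j : Int) + 1 := by omega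
      rw [PySem.List.pyRange_one_eq_nil hm]
      have : seive.dropLast.drop j = [] := by
        apply List.drop_eq_nil_of_le
        simp [List.length_dropLast]; omega
      rw [this]
      rfl

lemma run_eq_staged (n : Int) :
    ∀ (xs : List Int) (acc : Int) (row : List Int),
    pvRun n xs acc row = row ++ rowTopB_cut n (rowTopB_prefix acc xs) := by
  intro xs
  induction xs with
  | nil => intro acc row; simp [pvRun, rowTopB_prefix, rowTopB_cut]
  | cons x rest ih =>
    intro acc row
    simp only [pvRun, rowTopB_prefix, rowTopB_cut]
    split_ifs with h
    · rfl
    · rw [ih (acc + x) (row ++ [acc + x])]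
      simp

-- ===== VERDICT (by name: the statement is the Claim_ definition above) =====
theorem rowTop_spec : Claim_equal_rowTop := by
  intro n seive _
  unfold Spec_rowTop rowTop rowTop_alt
  have h1 := loop_eq n seive (seive.length - 1) 0 [] (by omega)
  have h2 := run_eq_staged n seive.dropLast 0 []
  rw [← List.dropLast_eq_take]
  simpa using h1.trans (by simpa using h2)
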